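-- pv_equiv track=rewrite | github.com/Azakanna/DOD | ЕГЭ/ ТС/дз/дз 09 04/6.py | f
-- ===== SOURCE A (Python) =====
-- def f(st,cmd,mas):
--     if cmd>7:
--         return 0
--     if cmd == 7:
--         if not (st in mas):
--             mas.append(st)
--         return 1
--     x = f(st * 2, cmd + 1, mas)
--     y = f(st * 2 + 1, cmd + 1, mas)
--     z = f(st * 3 + 1, cmd + 1, mas)
--     return x+y+z
-- ===== SOURCE B (Python) =====
-- def f(st, cmd, mas):
--     count = 0
--     stack = [(st, cmd)]
--     while stack:
--         s, c = stack.pop()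
--         if c > 7:
--             continue
--         if c == 7:
--             count += 1
--             if s not in mas:
--                 mas.append(s)
--         else:
--             stack.append((s * 3 + 1, c + 1))
--             stack.append((s * 2 + 1, c + 1))
--             stack.append((s * 2, c + 1))
--     return count
-- ===== Notes on version B (the rewrite author's own statement) =====
-- stated objective: alternative
-- what changed: Replaces the triple recursion with an explicit LIFO-stack iterative DFS (children pushed in reverse), accumulating the count and appending unique leaf states in the same first-occurrence order; Pre_ excludes cmd < -900, where A overflows the CPython recursion stack (RecursionError).
import Mathlib
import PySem

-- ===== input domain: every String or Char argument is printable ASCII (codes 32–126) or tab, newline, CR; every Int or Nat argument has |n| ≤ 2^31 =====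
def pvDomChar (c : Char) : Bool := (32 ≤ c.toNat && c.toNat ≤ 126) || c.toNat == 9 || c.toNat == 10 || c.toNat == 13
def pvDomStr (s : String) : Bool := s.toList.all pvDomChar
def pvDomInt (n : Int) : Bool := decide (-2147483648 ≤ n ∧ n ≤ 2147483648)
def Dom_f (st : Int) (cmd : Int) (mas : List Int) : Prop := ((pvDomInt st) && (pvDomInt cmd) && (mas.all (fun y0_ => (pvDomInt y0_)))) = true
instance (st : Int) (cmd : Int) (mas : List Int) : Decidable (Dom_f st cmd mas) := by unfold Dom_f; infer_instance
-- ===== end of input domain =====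

-- B replaces the triple recursion with an explicit LIFO-stack iterative DFS; A and B both
-- append unique leaf states to mas in the same order, and this equivalence is about the
-- RETURN value only (the mutation of mas is not modelled by the ports).

-- ===== PORT A =====
def f (st : Int) (cmd : Int) (mas : List Int) : Int :=
  if cmd > 7 then 0
  else if cmd == 7 then 1
  else
    f (st * 2) (cmd + 1) mas + f (st * 2 + 1) (cmd + 1) mas + f (st * 3 + 1) (cmd + 1) mas
termination_by (8 - cmd).toNat
decreasing_by all_goals (simp at *; omega)

-- ===== PORT B =====
-- measure for the stack loop: each entry (s, c) weighs 4^((8-c).toNat)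
def fAltMeasure (stack : List (Int × Int)) : Nat :=
  (stack.map (fun p => 4 ^ ((8 - p.2).toNat))).sum

theorem fAltMeasure_pop (s : Int) (c : Int) (rest : List (Int × Int)) :
    fAltMeasure rest < fAltMeasure ((s, c) :: rest) := by
  simp [fAltMeasure]

theorem fAltMeasure_push (s : Int) (c : Int) (rest : List (Int × Int)) (h : ¬ c > 7) (h2 : ¬ c == 7) :
    fAltMeasure ((s * 2, c + 1) :: (s * 2 + 1, c + 1) :: (s * 3 + 1, c + 1) :: rest)
      < fAltMeasure ((s, c) :: rest) := by
  simp at h h2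
  have hc : c < 7 := lt_of_le_of_ne (by omega) h2
  have he : (8 - c).toNat = (8 - (c + 1)).toNat + 1 := by omega
  simp [fAltMeasure, he, pow_succ]
  have hp : 0 < 4 ^ (8 - (c + 1)).toNat := by positivity
  omega

def fAltLoop (stack : List (Int × Int)) (count : Int) (mas : List Int) : Int :=
  match stack with
  | [] => count
  | (s, c) :: rest =>
    if c > 7 then fAltLoop rest count mas
    else if c == 7 then
      fAltLoop rest (count + 1) (if s ∈ mas then mas else mas ++ [s])
    else
      fAltLoop ((s * 2, c + 1) :: (s * 2 + 1, c + 1) :: (s * 3 + 1, c + 1) :: rest) count mas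
termination_by fAltMeasure stack
decreasing_by
  · exact fAltMeasure_pop s c rest
  · exact fAltMeasure_pop s c rest
  · exact fAltMeasure_push s c rest (by assumption) (by assumption)

def f_alt (st : Int) (cmd : Int) (mas : List Int) : Int :=
  fAltLoop [(st, cmd)] 0 mas

-- ===== PRECONDITION & SPEC =====
-- Pre_ excludes very negative cmd, on which the Python A overflows the CPython call stack and
-- raises RecursionError before reaching any leaf (the recursion depth is 8 - cmd); the bound
-- -900 is a conservative closed form for the interpreter's recursion limit of 1000.
def Pre_f (st : Int) (cmd : Int) (mas : List Int) : Prop := -900 ≤ cmd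
instance (st : Int) (cmd : Int) (mas : List Int) : Decidable (Pre_f st cmd mas) := by unfold Pre_f; infer_instance
def pvWitness_f : Int × Int × List Int := (0, 7, [])

def Spec_f (st : Int) (cmd : Int) (mas : List Int) (out : Int) : Prop := out = f_alt st cmd mas
instance (st : Int) (cmd : Int) (mas : List Int) (out : Int) : Decidable (Spec_f st cmd mas out) := by unfold Spec_f; infer_instance

-- ===== CLAIM (what is proved, stated in full; the proofs are below) =====
def Claim_equal_f : Prop := ∀ (st : Int) (cmd : Int) (mas : List Int), Dom_f st cmd mas → Pre_f st cmd mas → Spec_f st cmd mas (f st cmd mas)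

-- ===== LEMMAS AND PROOFS =====

-- the closed value of a subtree rooted at depth c (independent of the state and of mas)
def leafCount (c : Int) : Int := if c > 7 then 0 else 3 ^ ((7 - c).toNat)

theorem leafCount_step (c : Int) (hc : c < 7) :
    leafCount (c + 1) + leafCount (c + 1) + leafCount (c + 1) = leafCount c := by
  have h1 : ¬ c + 1 > 7 := by omega
  have h2 : ¬ c > 7 := by omega
  have he : (7 - c).toNat = (7 - (c + 1)).toNat + 1 := by omega
  simp only [leafCount, h1, if_false, h2, he, pow_succ]
  ring

theorem f_eq_leafCount (st : Int) (cmd : Int) (mas : List Int) : f st cmd mas = leafCount cmd := by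
  induction st, cmd using f.induct with
  | case1 st cmd h => rw [f]; simp [leafCount, h]
  | case2 st cmd h h7 =>
    have hc : cmd = 7 := by simpa using h7
    subst hc
    rw [f]; simp [leafCount]
  | case3 st cmd h h7 ih1 ih2 ih3 =>
    rw [f]
    simp only [if_neg h, if_neg h7]
    rw [ih1, ih2, ih3]
    have hc : cmd < 7 := by simp at h h7; omega
    exact leafCount_step cmd hc

theorem fAltLoop_eq (stack : List (Int × Int)) (count : Int) (mas : List Int) :
    fAltLoop stack count mas = count + (stack.map (fun p => leafCount p.2)).sum := by
  induction stack, count, mas using fAltLoop.induct with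
  | case1 count mas => rw [fAltLoop]; simp
  | case2 count mas s c rest h ih =>
    rw [fAltLoop]
    simp only [if_pos h, ih, List.map_cons, List.sum_cons]
    simp [leafCount, h]
  | case3 count mas s c rest h h7 ih =>
    rw [fAltLoop]
    simp only [if_neg h, if_pos h7, List.map_cons, List.sum_cons]
    simp only [dite_eq_ite] at ih
    rw [ih]
    have hc : c = 7 := by simpa using h7
    subst hc
    simp [leafCount]
    ring
  | case4 count mas s c rest h h7 ih =>
    rw [fAltLoop]
    simp only [if_neg h, if_neg h7, List.map_cons, List.sum_cons]
    rw [ih]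
    simp only [List.map_cons, List.sum_cons]
    have hc : c < 7 := by simp at h h7; omega
    rw [← leafCount_step c hc]
    ring

theorem f_alt_eq_leafCount (st : Int) (cmd : Int) (mas : List Int) : f_alt st cmd mas = leafCount cmd := by
  rw [f_alt, fAltLoop_eq]
  simp

-- ===== VERDICT (by name: the statement is the Claim_ definition above) =====
theorem f_spec : Claim_equal_f := by
  intro st cmd mas _ _
  unfold Spec_f
  rw [f_eq_leafCount, f_alt_eq_leafCount]
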